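-- pv_equiv track=rewrite | github.com/ghostr4z3r-ST/3d-helmholtz-robin-field-core-and-double-slit-bridge | scripts/04_reduction_to_minimal_core/stepD_stepE_bridge_geometry.py | longest_true_run
-- ===== SOURCE A (Python) =====
-- def longest_true_run(mask):
--     best = cur = 0
--     for v in mask:
--         if v:
--             cur += 1
--             best = max(best, cur)
--         else:
--             cur = 0
--     return best
-- ===== SOURCE B (Python) =====
-- def longest_true_run(mask):
--     # run-segmentation: find each maximal truthy run with an inner scan, take the max length
--     best = 0
--     i = 0
--     n = len(mask)
--     while i < n:
--         if mask[i]: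
--             j = i
--             while j < n and mask[j]:
--                 j += 1
--             if j - i > best:
--                 best = j - i
--             i = j
--         else:
--             i += 1
--     return best
-- ===== Notes on version B (the rewrite author's own statement) =====
-- stated objective: alternative
-- what changed: Replaces the reset-on-falsy running counter with run segmentation: an outer scan finds the start of each maximal truthy run, an inner scan measures it to its end, and the maximum run length is taken.
import Mathlib
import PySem

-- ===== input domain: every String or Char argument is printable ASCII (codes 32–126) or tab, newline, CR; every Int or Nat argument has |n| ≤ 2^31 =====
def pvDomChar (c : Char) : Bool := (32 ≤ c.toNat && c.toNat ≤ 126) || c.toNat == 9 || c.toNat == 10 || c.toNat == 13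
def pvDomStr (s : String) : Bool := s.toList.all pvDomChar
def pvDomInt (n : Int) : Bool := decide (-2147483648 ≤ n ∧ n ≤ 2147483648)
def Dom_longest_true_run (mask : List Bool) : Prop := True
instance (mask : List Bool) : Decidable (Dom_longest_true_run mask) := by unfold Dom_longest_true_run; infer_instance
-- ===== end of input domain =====

-- ===== PORT A =====
-- A: single pass with a running counter `cur` that resets on False; `best` tracks the max.
def longest_true_run (mask : List Bool) : Int :=
  (mask.foldl (fun (bc : Int × Int) v =>
    if v then (max bc.1 (bc.2 + 1), bc.2 + 1) else (bc.1, 0)) (0, 0)).1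

-- ===== PORT B =====
-- B: run segmentation — outer scan skips falsy elements; on a True the inner scan
-- measures the maximal run to its end, then the outer scan resumes after it.
mutual
  -- inner scan of Source B: measures the current run (cur = its length so far)
  def ltrInner : List Bool → Int → Int → Int
    | [], cur, best => max best cur
    | true :: t, cur, best => ltrInner t (cur + 1) best
    | false :: t, cur, best => ltrOuter t (max best cur)
  -- outer scan of Source B
  def ltrOuter : List Bool → Int → Int
    | [], best => best
    | true :: t, best => ltrInner t 1 best
    | false :: t, best => ltrOuter t best
end

def longest_true_run_alt (mask : List Bool) : Int := ltrOuter mask 0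

-- ===== PRECONDITION & SPEC =====
def Spec_longest_true_run (mask : List Bool) (out : Int) : Prop := out = longest_true_run_alt mask
instance (mask : List Bool) (out : Int) : Decidable (Spec_longest_true_run mask out) := by unfold Spec_longest_true_run; infer_instance

-- ===== CLAIM (what is proved, stated in full; the proofs are below) =====
def Claim_equal_longest_true_run : Prop := ∀ (mask : List Bool), Dom_longest_true_run mask → Spec_longest_true_run mask (longest_true_run mask)

-- ===== LEMMAS AND PROOFS =====

-- A's loop step, named for the invariant lemma
def ltrStep (bc : Int × Int) (v : Bool) : Int × Int :=
  if v then (max bc.1 (bc.2 + 1), bc.2 + 1) else (bc.1, 0)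

-- Joint invariant relating A's fold state to B's two scans:
-- with cur = 0 the fold computes ltrOuter; mid-run (state (max best cur, cur)) it computes ltrInner.
theorem ltr_invariant (l : List Bool) :
    (∀ best : Int, (l.foldl ltrStep (best, 0)).1 = ltrOuter l best) ∧
    (∀ best cur : Int, (l.foldl ltrStep (max best cur, cur)).1 = ltrInner l cur best) := by
  induction l with
  | nil => exact ⟨fun _ => rfl, fun _ _ => rfl⟩
  | cons v t ih =>
    refine ⟨fun best => ?_, fun best cur => ?_⟩
    · cases v with
      | true =>
        simp only [List.foldl_cons, ltrStep, ltrOuter, reduceIte]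
        have h1 : ((max best (0 + 1), (0:Int) + 1) : Int × Int) = (max best 1, 1) := by norm_num
        rw [h1, ih.2 best 1]
      | false =>
        simp only [List.foldl_cons, ltrStep, ltrOuter]
        exact ih.1 best
    · cases v with
      | true =>
        simp only [List.foldl_cons, ltrStep, ltrInner, reduceIte]
        have h2 : max (max best cur) (cur + 1) = max best (cur + 1) := by omega
        rw [h2, ih.2 best (cur + 1)]
      | false =>
        simp only [List.foldl_cons, ltrStep, ltrInner]
        exact ih.1 (max best cur)

-- ===== VERDICT (by name: the statement is the Claim_ definition above) =====
theorem longest_true_run_spec : Claim_equal_longest_true_run := by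
  intro mask _
  show longest_true_run mask = longest_true_run_alt mask
  have h := (ltr_invariant mask).1 0
  simpa [longest_true_run, longest_true_run_alt, ltrStep] using h
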